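-- pv_equiv track=rewrite | github.com/terrylica/rangebar-py | scripts/tda_regime_hurst_analysis_polars.py | assign_tda_regimes
-- ===== SOURCE A (Python) =====
-- from itertools import pairwise
--
-- def assign_tda_regimes(n: int, break_indices: list[int]) -> list[str]:
--     """Assign regime labels based on TDA break indices."""
--     if len(break_indices) == 0:
--         return ["stable"] * n
--
--     breaks = sorted(break_indices)
--     regimes = []
--
--     for idx in range(n):
--         if idx < breaks[0]:
--             regimes.append("pre_break_1")
--         elif len(breaks) == 1:
--             regimes.append("post_break_1")
--         elif idx < breaks[-1]:
--             for i, (b1, b2) in enumerate(pairwise(breaks)):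
--                 if b1 <= idx < b2:
--                     regimes.append(f"inter_break_{i + 1}")
--                     break
--             else:
--                 regimes.append(f"inter_break_{len(breaks) - 1}")
--         else:
--             regimes.append(f"post_break_{len(breaks)}")
--
--     return regimes
-- ===== SOURCE B (Python) =====
-- def assign_tda_regimes(n: int, break_indices: list[int]) -> list[str]:
--     """Assign regime labels based on TDA break indices (single merge pass)."""
--     if not break_indices:
--         return ["stable"] * n
--     breaks = sorted(break_indices)
--     k = len(breaks)
--     regimes = []
--     t = 0  # number of breaks <= idx, advanced monotonically
--     for idx in range(n):
--         while t < k and breaks[t] <= idx: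
--             t += 1
--         if t == 0:
--             regimes.append("pre_break_1")
--         elif t == k:
--             regimes.append(f"post_break_{k}")
--         else:
--             regimes.append(f"inter_break_{t}")
--     return regimes
-- ===== Notes on version B (the rewrite author's own statement) =====
-- stated objective: faster
-- what changed: Replaces A's per-index inner scan over all consecutive break pairs with a single merge pass: a pointer counting breaks <= idx advances monotonically across the sorted breaks, so labels are picked by the pointer value.
import Mathlib
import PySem

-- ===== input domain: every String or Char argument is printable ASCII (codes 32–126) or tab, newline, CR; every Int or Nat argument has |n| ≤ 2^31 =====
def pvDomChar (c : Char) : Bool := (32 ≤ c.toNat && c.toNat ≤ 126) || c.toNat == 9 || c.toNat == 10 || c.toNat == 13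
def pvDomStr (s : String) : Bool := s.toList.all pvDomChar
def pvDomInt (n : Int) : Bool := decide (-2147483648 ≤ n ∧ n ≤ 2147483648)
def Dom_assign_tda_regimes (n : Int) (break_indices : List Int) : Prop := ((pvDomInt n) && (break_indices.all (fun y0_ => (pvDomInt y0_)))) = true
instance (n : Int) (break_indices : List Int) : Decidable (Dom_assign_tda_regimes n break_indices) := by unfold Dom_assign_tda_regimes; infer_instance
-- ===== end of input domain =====

-- B replaces A's per-index inner scan over consecutive break pairs by a single merge pass
-- with a monotone pointer over the sorted breaks (objective: faster).

-- ===== PORT A =====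
-- inner 'for i, (b1, b2) in enumerate(pairwise(breaks)) … break / else' loop of A
def aInner (idx : Int) (fallbackIdx : Int) : Int → List (Int × Int) → String
  | _, [] => "inter_break_" ++ PySem.Int.toStr fallbackIdx         -- for-else branch
  | i, (b1, b2) :: rest =>
    if b1 ≤ idx ∧ idx < b2 then "inter_break_" ++ PySem.Int.toStr (i + 1)
    else aInner idx fallbackIdx (i + 1) rest

def assign_tda_regimes (n : Int) (break_indices : List Int) : List String :=
  if break_indices.length = 0 then List.replicate n.toNat "stable"
  else
    let breaks := PySem.List.sorted break_indices (fun x => x) false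
    (PySem.List.pyRange 0 n 1).foldl (fun regimes idx =>
      if idx < PySem.List.pyGetD breaks 0 0 then regimes ++ ["pre_break_1"]
      else if breaks.length = 1 then regimes ++ ["post_break_1"]
      else if idx < PySem.List.pyGetD breaks (-1) 0 then
        regimes ++ [aInner idx ((breaks.length : Int) - 1) 0 (breaks.zip breaks.tail)]
      else regimes ++ ["post_break_" ++ PySem.Int.toStr (breaks.length : Int)]) []

-- ===== PORT B =====
-- 'while t < k and breaks[t] <= idx: t += 1'
def bAdvance (breaks : List Int) (idx : Int) (t : Nat) : Nat :=
  if h : t < breaks.length then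
    if breaks[t] ≤ idx then bAdvance breaks idx (t + 1) else t
  else t
termination_by breaks.length - t

-- 'for idx in range(n): …' with the pointer t threaded through
def bLoop (breaks : List Int) (k : Nat) : List Int → Nat → List String → List String
  | [], _, regimes => regimes
  | idx :: rest, t, regimes =>
    let t' := bAdvance breaks idx t
    let lbl := if t' = 0 then "pre_break_1"
      else if t' = k then "post_break_" ++ PySem.Int.toStr (k : Int)
      else "inter_break_" ++ PySem.Int.toStr (t' : Int)
    bLoop breaks k rest t' (regimes ++ [lbl])

def assign_tda_regimes_alt (n : Int) (break_indices : List Int) : List String :=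
  if break_indices = [] then List.replicate n.toNat "stable"
  else
    let breaks := PySem.List.sorted break_indices (fun x => x) false
    bLoop breaks breaks.length (PySem.List.pyRange 0 n 1) 0 []

-- ===== PRECONDITION & SPEC =====
def Spec_assign_tda_regimes (n : Int) (break_indices : List Int) (out : List String) : Prop := out = assign_tda_regimes_alt n break_indices
instance (n : Int) (break_indices : List Int) (out : List String) : Decidable (Spec_assign_tda_regimes n break_indices out) := by unfold Spec_assign_tda_regimes; infer_instance

-- ===== CLAIM (what is proved, stated in full; the proofs are below) =====
def Claim_equal_assign_tda_regimes : Prop := ∀ (n : Int) (break_indices : List Int), Dom_assign_tda_regimes n break_indices → Spec_assign_tda_regimes n break_indices (assign_tda_regimes n break_indices)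

-- ===== LEMMAS AND PROOFS =====

-- number of breaks ≤ idx: the value B's pointer t tracks
def cnt (breaks : List Int) (idx : Int) : Nat := breaks.countP (fun b => decide (b ≤ idx))

-- the common label of index idx, expressed through cnt
def labelC (breaks : List Int) (idx : Int) : String :=
  let c := cnt breaks idx
  if c = 0 then "pre_break_1"
  else if c = breaks.length then "post_break_" ++ PySem.Int.toStr (breaks.length : Int)
  else "inter_break_" ++ PySem.Int.toStr (c : Int)

lemma cnt_le_length (breaks : List Int) (idx : Int) : cnt breaks idx ≤ breaks.length := by
  unfold cnt; exact List.countP_le_length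

lemma cnt_mono (breaks : List Int) {i j : Int} (h : i ≤ j) : cnt breaks i ≤ cnt breaks j := by
  unfold cnt
  apply List.countP_mono_left
  intro x _ hx
  simp only [decide_eq_true_eq] at hx ⊢
  omega

lemma cnt_eq_zero_of_lt {b : Int} {rest : List Int} (hp : List.Pairwise (· ≤ ·) (b :: rest))
    {idx : Int} (hidx : idx < b) : cnt (b :: rest) idx = 0 := by
  rw [cnt, List.countP_eq_zero]
  intro x hx
  rcases List.mem_cons.mp hx with rfl | hx
  · simp; omega
  · have := (List.pairwise_cons.mp hp).1 x hx
    simp; omega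

-- on a sorted list, breaks[i] ≤ idx  ↔  i < cnt breaks idx
lemma sorted_getElem_le_iff (breaks : List Int) (hp : List.Pairwise (· ≤ ·) breaks)
    (idx : Int) : ∀ i (h : i < breaks.length), (breaks[i] ≤ idx ↔ i < cnt breaks idx) := by
  induction breaks with
  | nil => intro i h; simp at h
  | cons b rest ih =>
    intro i h
    by_cases hb : b ≤ idx
    · have hc : cnt (b :: rest) idx = cnt rest idx + 1 := by
        simp [cnt, hb]
      cases i with
      | zero => simpa [hc] using hb
      | succ j =>
        have hj : j < rest.length := by simpa using h
        have := ih (List.pairwise_cons.mp hp).2 j hj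
        simpa [hc, Nat.succ_lt_succ_iff] using this
    · have hc : cnt (b :: rest) idx = 0 := cnt_eq_zero_of_lt hp (by omega)
      cases i with
      | zero => simpa [hc] using hb
      | succ j =>
        have hj : j < rest.length := by simpa using h
        have hbx : b ≤ rest[j] := (List.pairwise_cons.mp hp).1 _ (List.getElem_mem hj)
        simp [hc]; omega

lemma bAdvance_eq (breaks : List Int) (hp : List.Pairwise (· ≤ ·) breaks) (idx : Int) :
    ∀ t, t ≤ cnt breaks idx → bAdvance breaks idx t = cnt breaks idx := by
  suffices H : ∀ (m t : Nat), breaks.length - t = m → t ≤ cnt breaks idx →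
      bAdvance breaks idx t = cnt breaks idx by
    intro t ht; exact H (breaks.length - t) t rfl ht
  intro m
  induction m with
  | zero =>
    intro t hm ht
    have hge : ¬ t < breaks.length := by omega
    rw [bAdvance, dif_neg hge]
    have := cnt_le_length breaks idx
    omega
  | succ m ih =>
    intro t hm ht
    have hlt : t < breaks.length := by omega
    rw [bAdvance, dif_pos hlt]
    by_cases hle : breaks[t] ≤ idx
    · rw [if_pos hle]
      have htc : t < cnt breaks idx := (sorted_getElem_le_iff breaks hp idx t hlt).mp hle
      exact ih (t + 1) (by omega) (by omega)
    · rw [if_neg hle]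
      have : ¬ t < cnt breaks idx := fun hc =>
        hle ((sorted_getElem_le_iff breaks hp idx t hlt).mpr hc)
      omega

lemma bLoop_eq (breaks : List Int) (hp : List.Pairwise (· ≤ ·) breaks) :
    ∀ (idxs : List Int), List.Pairwise (· ≤ ·) idxs →
    ∀ (t : Nat) (regimes : List String), (∀ a, idxs.head? = some a → t ≤ cnt breaks a) →
    bLoop breaks breaks.length idxs t regimes = regimes ++ idxs.map (labelC breaks) := by
  intro idxs
  induction idxs with
  | nil => intro _ t regimes _; simp [bLoop]
  | cons idx rest ih =>
    intro hpi t regimes ht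
    have ht' : bAdvance breaks idx t = cnt breaks idx :=
      bAdvance_eq breaks hp idx t (ht idx rfl)
    have hrest : ∀ a, rest.head? = some a → cnt breaks idx ≤ cnt breaks a := by
      intro a ha
      have hmem : a ∈ rest := List.mem_of_mem_head? ha
      exact cnt_mono breaks ((List.pairwise_cons.mp hpi).1 a hmem)
    rw [bLoop, ht', ih (List.pairwise_cons.mp hpi).2 _ _ hrest]
    simp [labelC]

-- cnt of a sorted cons whose head exceeds idx is 0; tail version used in aInner_eq
lemma aInner_eq (idx : Int) :
    ∀ (rest : List Int) (b : Int), List.Pairwise (· ≤ ·) (b :: rest) → rest ≠ [] →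
    b ≤ idx → idx < (b :: rest).getLast (by simp) →
    ∀ (i fb : Int), aInner idx fb i ((b :: rest).zip rest) =
      "inter_break_" ++ PySem.Int.toStr (i + (cnt (b :: rest) idx : Int)) := by
  intro rest
  induction rest with
  | nil => intro b _ hne; exact absurd rfl hne
  | cons b2 rest2 ih =>
    intro b hp _ hb hlast i fb
    have hp2 : List.Pairwise (· ≤ ·) (b2 :: rest2) := (List.pairwise_cons.mp hp).2
    by_cases h2 : idx < b2
    · -- first pair fires
      have hc2 : cnt (b2 :: rest2) idx = 0 := cnt_eq_zero_of_lt hp2 h2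
      have hc : cnt (b :: b2 :: rest2) idx = 1 := by
        simp [cnt, hb] at hc2 ⊢; simpa [cnt] using hc2
      rw [List.zip_cons_cons, aInner, if_pos ⟨hb, h2⟩, hc]
      norm_num
    · -- move to the next pair
      push Not at h2
      have hr2 : rest2 ≠ [] := by
        rintro rfl
        have : (b :: [b2]).getLast (by simp) = b2 := by simp
        rw [this] at hlast; omega
      have hlast2 : idx < (b2 :: rest2).getLast (by simp) := by
        have : (b :: b2 :: rest2).getLast (by simp) = (b2 :: rest2).getLast (by simp) :=
          List.getLast_cons (by simp)
        rwa [this] at hlast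
      have hrec := ih b2 hp2 hr2 h2 hlast2 (i + 1) fb
      have hc : cnt (b :: b2 :: rest2) idx = cnt (b2 :: rest2) idx + 1 := by
        simp [cnt, List.countP_cons, hb]
      rw [List.zip_cons_cons, aInner, if_neg (by omega), hrec, hc]
      congr 2
      push_cast
      ring

-- the per-index label A computes equals labelC, on sorted nonempty breaks
lemma aLabel_eq (breaks : List Int) (hp : List.Pairwise (· ≤ ·) breaks) (hne : breaks ≠ [])
    (idx : Int) :
    (if idx < PySem.List.pyGetD breaks 0 0 then "pre_break_1"
     else if breaks.length = 1 then "post_break_1"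
     else if idx < PySem.List.pyGetD breaks (-1) 0 then
       aInner idx ((breaks.length : Int) - 1) 0 (breaks.zip breaks.tail)
     else "post_break_" ++ PySem.Int.toStr (breaks.length : Int)) = labelC breaks idx := by
  obtain ⟨b, rest, rfl⟩ := List.exists_cons_of_ne_nil hne
  rw [PySem.List.pyGetD_zero_cons, PySem.List.pyGetD_neg_one _ _ hne]
  have hiff0 := sorted_getElem_le_iff _ hp idx 0 (by simp)
  simp only [List.getElem_cons_zero] at hiff0
  by_cases h0 : idx < b
  · have hc : cnt (b :: rest) idx = 0 := cnt_eq_zero_of_lt hp h0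
    rw [if_pos h0, labelC]
    simp [hc]
  · push Not at h0
    have hcpos : 0 < cnt (b :: rest) idx := hiff0.mp h0
    rw [if_neg (by omega)]
    by_cases h1 : (b :: rest).length = 1
    · have : rest = [] := by simpa using h1
      subst this
      have hc : cnt [b] idx = 1 := by simp [cnt, h0]
      rw [if_pos h1, labelC]
      simp [hc]
      decide
    · rw [if_neg h1]
      have hrne : rest ≠ [] := by
        rintro rfl; simp at h1
      have hlastIff : (b :: rest).getLast (by simp) ≤ idx ↔
          cnt (b :: rest) idx = (b :: rest).length := by
        have hlt : (b :: rest).length - 1 < (b :: rest).length := by simp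
        have := sorted_getElem_le_iff _ hp idx ((b :: rest).length - 1) hlt
        rw [← List.getLast_eq_getElem (by simp)] at this
        have hle := cnt_le_length (b :: rest) idx
        constructor
        · intro hx; have := this.mp hx; omega
        · intro hx; exact this.mpr (by omega)
      by_cases h2 : idx < (b :: rest).getLast (by simp)
      · rw [if_pos h2]
        have hzip : (b :: rest).tail = rest := rfl
        rw [hzip, aInner_eq idx rest b hp hrne h0 h2 0 _]
        have hcne : cnt (b :: rest) idx ≠ (b :: rest).length := by
          intro hx; exact absurd (hlastIff.mpr hx) (by omega)
        rw [labelC]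
        simp only [if_neg (by omega : ¬ cnt (b :: rest) idx = 0), if_neg hcne]
        congr 2
        ring
      · push Not at h2
        have hc : cnt (b :: rest) idx = (b :: rest).length := hlastIff.mp h2
        rw [if_neg (by omega), labelC]
        simp [hc]

-- ===== VERDICT (by name: the statement is the Claim_ definition above) =====
theorem assign_tda_regimes_spec : Claim_equal_assign_tda_regimes := by
  unfold Claim_equal_assign_tda_regimes Spec_assign_tda_regimes
  intro n break_indices _
  unfold assign_tda_regimes assign_tda_regimes_alt
  by_cases hb : break_indices = []
  · simp [hb]
  · rw [if_neg (by simpa using hb), if_neg hb]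
    set breaks := PySem.List.sorted break_indices (fun x => x) false with hbr
    have hp : List.Pairwise (· ≤ ·) breaks := by
      simpa using PySem.List.sorted_pairwise break_indices (fun x => x)
    have hne : breaks ≠ [] := by
      rw [hbr, Ne, PySem.List.sorted_eq_nil_iff]; exact hb
    have hA : (PySem.List.pyRange 0 n 1).foldl (fun regimes idx =>
        if idx < PySem.List.pyGetD breaks 0 0 then regimes ++ ["pre_break_1"]
        else if breaks.length = 1 then regimes ++ ["post_break_1"]
        else if idx < PySem.List.pyGetD breaks (-1) 0 then
          regimes ++ [aInner idx ((breaks.length : Int) - 1) 0 (breaks.zip breaks.tail)]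
        else regimes ++ ["post_break_" ++ PySem.Int.toStr (breaks.length : Int)]) []
        = (PySem.List.pyRange 0 n 1).map (labelC breaks) := by
      have hfun : (fun (regimes : List String) (idx : Int) =>
          if idx < PySem.List.pyGetD breaks 0 0 then regimes ++ ["pre_break_1"]
          else if breaks.length = 1 then regimes ++ ["post_break_1"]
          else if idx < PySem.List.pyGetD breaks (-1) 0 then
            regimes ++ [aInner idx ((breaks.length : Int) - 1) 0 (breaks.zip breaks.tail)]
          else regimes ++ ["post_break_" ++ PySem.Int.toStr (breaks.length : Int)])
          = fun regimes idx => regimes ++ [labelC breaks idx] := by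
        funext regimes idx
        rw [← aLabel_eq breaks hp hne idx]
        split_ifs <;> rfl
      rw [hfun]
      simpa using PySem.List.foldl_append_singleton_eq_map (labelC breaks)
        (PySem.List.pyRange 0 n 1) []
    have hB : bLoop breaks breaks.length (PySem.List.pyRange 0 n 1) 0 []
        = (PySem.List.pyRange 0 n 1).map (labelC breaks) := by
      have hpi : List.Pairwise (· ≤ ·) (PySem.List.pyRange 0 n 1) :=
        (PySem.List.pairwise_lt_pyRange_one 0 n).imp (fun h => le_of_lt h)
      simpa using bLoop_eq breaks hp (PySem.List.pyRange 0 n 1) hpi 0 []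
        (fun a _ => Nat.zero_le _)
    rw [hA, hB]
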